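-- pv_equiv track=rewrite | github.com/bethCoderNewbie/SEC-finetune | src/analysis/segment_annotator.py | _heuristic_label
-- ===== SOURCE A (Python) =====
-- from typing import Any, ClassVar, Dict, List, Optional, Tuple
--
-- _HEURISTIC_KEYWORDS: Dict[str, List[str]] = {
--     "cybersecurity":  ["cybersecurity", "data breach", "ransomware", "gdpr", "unauthorized access"],
--     "regulatory":     ["regulatory", "compliance", "sec", "litigation", "enforcement", "cftc"],
--     "financial":      ["liquidity", "credit", "default", "interest rate", "refinancing", "debt"],
--     "supply_chain":   ["supply chain", "supplier", "logistics", "procurement", "sourcing"],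
--     "market":         ["competition", "market share", "pricing", "demand", "commodity"],
--     "esg":            ["environmental", "climate", "greenhouse", "esg", "emissions", "sustainability"],
--     "macro":          ["inflation", "recession", "gdp", "federal reserve", "foreign exchange", "tariff"],
--     "human_capital":  ["workforce", "talent", "retention", "labor", "union", "employee"],
--     "other":          [],
-- }
--
-- def _heuristic_label(text: str) -> str:
--     """
--     Keyword-based fallback label (§4.5).
--     Returns the archetype with the most keyword matches, or 'other' if none match.
--     """
--     text_lower = text.lower()
--     best_archetype = "other"
--     best_count = 0
--     for archetype, keywords in _HEURISTIC_KEYWORDS.items():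
--         count = sum(1 for kw in keywords if kw in text_lower)
--         if count > best_count:
--             best_count = count
--             best_archetype = archetype
--     return best_archetype
-- ===== SOURCE B (Python) =====
-- _HEURISTIC_KEYWORDS = {
--     "cybersecurity":  ["cybersecurity", "data breach", "ransomware", "gdpr", "unauthorized access"],
--     "regulatory":     ["regulatory", "compliance", "sec", "litigation", "enforcement", "cftc"],
--     "financial":      ["liquidity", "credit", "default", "interest rate", "refinancing", "debt"],
--     "supply_chain":   ["supply chain", "supplier", "logistics", "procurement", "sourcing"],
--     "market":         ["competition", "market share", "pricing", "demand", "commodity"],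
--     "esg":            ["environmental", "climate", "greenhouse", "esg", "emissions", "sustainability"],
--     "macro":          ["inflation", "recession", "gdp", "federal reserve", "foreign exchange", "tariff"],
--     "human_capital":  ["workforce", "talent", "retention", "labor", "union", "employee"],
--     "other":          [],
-- }
--
-- # flat (keyword, archetype) index built once from the table
-- _KW_INDEX = [(kw, arch) for arch, kws in _HEURISTIC_KEYWORDS.items() for kw in kws]
--
-- def _heuristic_label(text: str) -> str:
--     """Match-driven: scan one flat keyword index, collecting the archetype
--     label of every keyword that occurs in the text; if nothing matched
--     return 'other', otherwise return the most frequent label (max over the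
--     table's archetypes keyed by multiplicity; ties keep table order)."""
--     tl = text.lower()
--     matched = [arch for kw, arch in _KW_INDEX if kw in tl]
--     if not matched:
--         return "other"
--     return max(_HEURISTIC_KEYWORDS, key=matched.count)
-- ===== Notes on version B (the rewrite author's own statement) =====
-- stated objective: alternative
-- what changed: B inverts the data structure: it flattens the table into one (keyword, archetype) index, collects the archetype label of each matching keyword into a multiset in a single flat scan, and then selects the winner as max over the archetypes keyed by multiplicity (matched.count), instead of A's per-archetype counting with inline best-so-far tracking.
import Mathlib
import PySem

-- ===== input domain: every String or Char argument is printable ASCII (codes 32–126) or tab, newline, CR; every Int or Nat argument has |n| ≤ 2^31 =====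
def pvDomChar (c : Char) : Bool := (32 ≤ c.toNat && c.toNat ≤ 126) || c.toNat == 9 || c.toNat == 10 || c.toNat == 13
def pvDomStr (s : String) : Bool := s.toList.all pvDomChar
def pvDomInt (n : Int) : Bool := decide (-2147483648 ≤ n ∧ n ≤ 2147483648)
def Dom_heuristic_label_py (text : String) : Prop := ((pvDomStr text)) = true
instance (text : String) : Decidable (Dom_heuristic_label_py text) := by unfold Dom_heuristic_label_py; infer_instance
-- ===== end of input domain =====

-- B inverts the data structure: one flat (keyword, archetype) index is scanned once,
-- collecting a label per match, and the winner is max over archetypes keyed by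
-- multiplicity, instead of A's per-archetype counting with inline best tracking.

-- the module-level _HEURISTIC_KEYWORDS table, shared verbatim by both Pythons
def hlTable : List (String × List String) :=
  [("cybersecurity", ["cybersecurity", "data breach", "ransomware", "gdpr", "unauthorized access"]),
   ("regulatory",    ["regulatory", "compliance", "sec", "litigation", "enforcement", "cftc"]),
   ("financial",     ["liquidity", "credit", "default", "interest rate", "refinancing", "debt"]),
   ("supply_chain",  ["supply chain", "supplier", "logistics", "procurement", "sourcing"]),
   ("market",        ["competition", "market share", "pricing", "demand", "commodity"]),
   ("esg",           ["environmental", "climate", "greenhouse", "esg", "emissions", "sustainability"]),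
   ("macro",         ["inflation", "recession", "gdp", "federal reserve", "foreign exchange", "tariff"]),
   ("human_capital", ["workforce", "talent", "retention", "labor", "union", "employee"]),
   ("other",         [])]

-- ===== PORT A =====
-- sum(1 for kw in keywords if kw in text_lower)
def hlKwCount (keywords : List String) (textLower : String) : Int :=
  keywords.foldl (fun acc kw => if PySem.Str.isIn kw textLower then acc + 1 else acc) 0

def heuristic_label_py (text : String) : String :=
  let textLower := PySem.Str.lower text
  let r := hlTable.foldl
    (fun (st : String × Int) (p : String × List String) =>
      let count := hlKwCount p.2 textLower
      if count > st.2 then (p.1, count) else st)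
    ("other", 0)
  r.1

-- ===== PORT B =====
-- _KW_INDEX = [(kw, arch) for arch, kws in _HEURISTIC_KEYWORDS.items() for kw in kws]
def hlKwIndex : List (String × String) :=
  hlTable.flatMap (fun p => p.2.map (fun kw => (kw, p.1)))

-- matched = [arch for kw, arch in _KW_INDEX if kw in tl]; then
-- max(_HEURISTIC_KEYWORDS, key=matched.count) — max over the dict's keys in table
-- order, first maximum, is PySem.List.max?; its none case is unreachable (the key
-- list is a nonempty literal).
def heuristic_label_py_alt (text : String) : String :=
  let tl := PySem.Str.lower text
  let matched := (hlKwIndex.filter (fun p => PySem.Str.isIn p.1 tl)).map (fun p => p.2)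
  if matched.isEmpty then "other"
  else
    match PySem.List.max? (hlTable.map (fun p => p.1)) (fun a => (matched.count a : Int)) with
    | some a => a
    | none => "other"

-- ===== PRECONDITION & SPEC =====
def Spec_heuristic_label_py (text : String) (out : String) : Prop := out = heuristic_label_py_alt text
instance (text : String) (out : String) : Decidable (Spec_heuristic_label_py text out) := by unfold Spec_heuristic_label_py; infer_instance

-- ===== CLAIM (what is proved, stated in full; the proofs are below) =====
def Claim_equal_heuristic_label_py : Prop := ∀ (text : String), Dom_heuristic_label_py text → Spec_heuristic_label_py text (heuristic_label_py text)

-- ===== LEMMAS AND PROOFS =====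

-- hlKwCount is the countP of the matching keywords
theorem hlKwCount_eq_countP (keywords : List String) (tl : String) :
    hlKwCount keywords tl = (keywords.countP (fun kw => PySem.Str.isIn kw tl) : Int) := by
  unfold hlKwCount
  suffices h : ∀ (l : List String) (a : Int),
      l.foldl (fun acc kw => if PySem.Str.isIn kw tl then acc + 1 else acc) a =
        a + (l.countP (fun kw => PySem.Str.isIn kw tl) : Int) by
    simpa using h keywords 0
  intro l
  induction l with
  | nil => intro a; simp
  | cons k t ih =>
    intro a
    simp only [List.foldl_cons, List.countP_cons, ih]
    by_cases h : PySem.Str.isIn k tl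
    · simp only [h, if_true]; push_cast; omega
    · simp only [h, if_false, Bool.false_eq_true]; push_cast; omega

-- keyword counts are never negative
theorem hlKwCount_nonneg (keywords : List String) (tl : String) : 0 ≤ hlKwCount keywords tl := by
  rw [hlKwCount_eq_countP]; positivity

-- max? over a nonempty list is the plain first-strict-max fold
theorem max?_cons_foldl {α β : Type} [LinearOrder β] (key : α → β) (x : α) (t : List α) :
    PySem.List.max? (x :: t) key =
      some (t.foldl (fun m y => if key m < key y then y else m) x) := by
  simp only [PySem.List.max?]
  induction t generalizing x with
  | nil => rfl
  | cons y t ih => simp only [List.foldl_cons]; rw [← ih]; split <;> rfl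

-- naturality: max? of a mapped list, keyed by the second component
theorem max?_map_pair (keys : List String) (cnt : String → Int) :
    PySem.List.max? (keys.map (fun a => (a, cnt a))) (fun p : String × Int => p.2) =
      (PySem.List.max? keys cnt).map (fun a => (a, cnt a)) := by
  cases keys with
  | nil => rfl
  | cons x t =>
    rw [List.map_cons, max?_cons_foldl, max?_cons_foldl, Option.map_some]
    congr 1
    rw [List.foldl_map]
    induction t generalizing x with
    | nil => rfl
    | cons y t ih =>
      simp only [List.foldl_cons]
      rw [← ih]
      split <;> rfl

-- A's inline best-tracking fold equals the running-max fold followed by a positivity guard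
theorem fold_guard (t : List (String × Int)) :
    ∀ (m : String × Int), 0 ≤ m.2 →
      (t.foldl (fun (st : String × Int) p => if st.2 < p.2 then p else st)
          (if 0 < m.2 then m else ("other", 0))).1 =
        (let r := t.foldl (fun m y => if m.2 < y.2 then y else m) m
         if 0 < r.2 then r.1 else "other") := by
  induction t with
  | nil =>
    intro m hm
    by_cases h : 0 < m.2 <;> simp [h]
  | cons p t ih =>
    intro m hm
    simp only [List.foldl_cons]
    by_cases h : 0 < m.2
    · have h2 : (if m.2 < p.2 then p else m).2 > 0 := by split <;> omega
      have := ih (if m.2 < p.2 then p else m) (by omega)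
      rw [if_pos h]
      rw [if_pos h2] at this
      exact this
    · have hm0 : m.2 = 0 := by omega
      rw [if_neg h]
      by_cases hp : 0 < p.2
      · have : ((("other":String), (0:Int)).2 < p.2) := by simpa using hp
        rw [if_pos this]
        have hmp : m.2 < p.2 := by omega
        rw [if_pos hmp]
        have := ih p (by omega)
        rw [if_pos hp] at this
        exact this
      · have : ¬ ((("other":String), (0:Int)).2 < p.2) := by simpa using hp
        rw [if_neg this]
        have hmp : ¬ (m.2 < p.2) := by omega
        rw [if_neg hmp]
        have := ih m hm
        rw [if_neg h] at this
        exact this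

-- A characterized through max? on the (archetype, count) pairs
theorem A_char (tl : String) :
    (hlTable.foldl
        (fun (st : String × Int) (p : String × List String) =>
          if hlKwCount p.2 tl > st.2 then (p.1, hlKwCount p.2 tl) else st)
        ("other", 0)).1 =
      (match PySem.List.max? (hlTable.map (fun p => (p.1, hlKwCount p.2 tl))) (fun p => p.2) with
       | none => "other"
       | some best => if best.2 > 0 then best.1 else "other") := by
  have hmap : ∀ (l : List (String × List String)) (init : String × Int),
      l.foldl (fun st p => if hlKwCount p.2 tl > st.2 then (p.1, hlKwCount p.2 tl) else st) init =
        (l.map (fun p => (p.1, hlKwCount p.2 tl))).foldl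
          (fun st q => if st.2 < q.2 then q else st) init := by
    intro l
    induction l with
    | nil => intro init; rfl
    | cons p t ih => intro init; simp only [List.foldl_cons, List.map_cons, gt_iff_lt]; exact ih _
  rw [hmap]
  obtain ⟨x, t, hxt, hx2⟩ : ∃ x t, hlTable.map (fun p => (p.1, hlKwCount p.2 tl)) = x :: t ∧
      x = ("cybersecurity", hlKwCount ["cybersecurity", "data breach", "ransomware", "gdpr",
        "unauthorized access"] tl) := ⟨_, _, rfl, rfl⟩
  rw [hxt, max?_cons_foldl]
  simp only [List.foldl_cons]
  have hx : 0 ≤ x.2 := hx2 ▸ hlKwCount_nonneg _ _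
  have step : (if ((("other":String), (0:Int)).2 < x.2) then x else ("other", 0)) =
      (if 0 < x.2 then x else ("other", 0)) := by norm_num
  rw [step]
  have := fold_guard t x hx
  simp only at this ⊢
  rw [this]

-- B's matched list in flatMap/replicate shape
theorem matched_shape (tl : String) :
    (hlKwIndex.filter (fun p => PySem.Str.isIn p.1 tl)).map (fun p => p.2) =
      hlTable.flatMap (fun p => List.replicate (p.2.countP (fun kw => PySem.Str.isIn kw tl)) p.1) := by
  unfold hlKwIndex
  suffices h : ∀ (T : List (String × List String)),
      ((T.flatMap (fun p => p.2.map (fun kw => (kw, p.1)))).filter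
          (fun p => PySem.Str.isIn p.1 tl)).map (fun p => p.2) =
        T.flatMap (fun p => List.replicate (p.2.countP (fun kw => PySem.Str.isIn kw tl)) p.1) from
    h hlTable
  intro T
  induction T with
  | nil => rfl
  | cons p T ih =>
    simp only [List.flatMap_cons, List.filter_append, List.map_append, ih]
    congr 1
    induction p.2 with
    | nil => rfl
    | cons k ks ihk =>
      simp only [List.map_cons, List.filter_cons, List.countP_cons]
      by_cases hk : PySem.Str.isIn k tl
      · simp only [hk, if_true, List.map_cons, ihk, List.replicate_succ]
      · simp only [hk, if_false, Bool.false_eq_true, ihk, add_zero]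

-- the (archetype, count) pairs A folds over are exactly the archetypes keyed by matched-multiplicity
theorem cs_eq (tl : String) :
    hlTable.map (fun p => (p.1, hlKwCount p.2 tl)) =
      (hlTable.map (fun p => p.1)).map
        (fun a => (a, (((hlKwIndex.filter (fun p => PySem.Str.isIn p.1 tl)).map (fun p => p.2)).count a : Int))) := by
  rw [matched_shape]
  simp only [hlTable, List.flatMap_cons, List.flatMap_nil, List.count_append,
    List.count_replicate, List.map_cons, List.map_nil, List.append_nil, hlKwCount_eq_countP]
  norm_num

-- every matched label is a table key
theorem matched_subset (tl : String) :
    ∀ x ∈ (hlKwIndex.filter (fun p => PySem.Str.isIn p.1 tl)).map (fun p => p.2),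
      x ∈ hlTable.map (fun p => p.1) := by
  rw [matched_shape]
  intro x hx
  rw [List.mem_flatMap] at hx
  obtain ⟨p, hp, hxr⟩ := hx
  rw [List.mem_replicate] at hxr
  exact hxr.2 ▸ List.mem_map_of_mem hp

-- ===== VERDICT (by name: the statement is the Claim_ definition above) =====
theorem heuristic_label_py_spec : Claim_equal_heuristic_label_py := by
  intro text _
  show heuristic_label_py text = heuristic_label_py_alt text
  unfold heuristic_label_py heuristic_label_py_alt
  simp only []
  rw [A_char (PySem.Str.lower text), cs_eq (PySem.Str.lower text), max?_map_pair]
  generalize hmt : (hlKwIndex.filter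
      (fun p => PySem.Str.isIn p.1 (PySem.Str.lower text))).map (fun p => p.2) = matched
  have hsub : ∀ x ∈ matched, x ∈ hlTable.map (fun p => p.1) :=
    hmt ▸ matched_subset (PySem.Str.lower text)
  cases hM : PySem.List.max? (hlTable.map (fun p => p.1)) (fun a => (matched.count a : Int)) with
  | none =>
    rw [PySem.List.max?_eq_none_iff] at hM
    simp [hlTable] at hM
  | some b =>
    simp only [Option.map_some]
    by_cases hE : matched.isEmpty
    · rw [List.isEmpty_iff] at hE
      subst hE
      simp
    · rw [if_neg hE]
      obtain ⟨x, hx⟩ := List.exists_mem_of_ne_nil matched (by simpa [List.isEmpty_iff] using hE)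
      have hxk : x ∈ hlTable.map (fun p => p.1) := hsub x hx
      have hle : (matched.count x : Int) ≤ (matched.count b : Int) :=
        PySem.List.max?_isMax hM x hxk
      have hpos : 0 < matched.count x := List.count_pos_iff.mpr hx
      have : (0 : Int) < (matched.count b : Int) := by
        have : (0 : Int) < (matched.count x : Int) := by exact_mod_cast hpos
        omega
      rw [if_pos this]
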